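-- pv_equiv track=rewrite | github.com/ruizalec/Curso_git | Proy_python/Tarea3.py | obtener_numeros_pares_y_primos
-- ===== SOURCE A (Python) =====
-- def es_primo(numero):
--     if numero < 2: # Los números menores que 2 no son primos
--         return False
--     for i in range(2, int(numero ** 0.5) + 1): # Verificar divisibilidad hasta la raíz cuadrada del número
--         if numero % i == 0: # Si el número es divisible por i, no es primo
--             return False
--     return True
--
-- def obtener_numeros_pares_y_primos(minimo, maximo):
--     pares = []
--     primos = []
--     for num in range(minimo, maximo + 1): # Iterar desde el mínimo hasta el máximo
--         if num % 2 == 0: # Verificar si el número es par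
--             pares.append(num)
--         if es_primo(num): # Verificar si el número es primo
--             primos.append(num)
--     return primos, pares
-- ===== SOURCE B (Python) =====
-- def obtener_numeros_pares_y_primos(minimo, maximo):
--     lo = max(minimo, 2)
--     if maximo < lo:
--         primos = []
--     else:
--         size = maximo - lo + 1
--         es = [True] * size
--         r = 1
--         while (r + 1) * (r + 1) <= maximo:
--             r += 1
--         for d in range(2, r + 1):
--             start = max(2 * d, ((lo + d - 1) // d) * d)
--             for m in range(start, maximo + 1, d):
--                 es[m - lo] = False
--         primos = [lo + i for i in range(size) if es[i]]
--     inicio = minimo if minimo % 2 == 0 else minimo + 1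
--     pares = list(range(inicio, maximo + 1, 2))
--     return primos, pares
-- ===== Notes on version B (the rewrite author's own statement) =====
-- stated objective: faster
-- what changed: Per-number trial division is replaced by a segment sieve: a boolean array over [max(minimo,2), maximo] in which, for every candidate divisor d up to isqrt(maximo), the multiples k*d (k>=2) are struck out by direct stepping, and the evens are generated by a stride-2 range instead of testing each number.
import Mathlib
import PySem

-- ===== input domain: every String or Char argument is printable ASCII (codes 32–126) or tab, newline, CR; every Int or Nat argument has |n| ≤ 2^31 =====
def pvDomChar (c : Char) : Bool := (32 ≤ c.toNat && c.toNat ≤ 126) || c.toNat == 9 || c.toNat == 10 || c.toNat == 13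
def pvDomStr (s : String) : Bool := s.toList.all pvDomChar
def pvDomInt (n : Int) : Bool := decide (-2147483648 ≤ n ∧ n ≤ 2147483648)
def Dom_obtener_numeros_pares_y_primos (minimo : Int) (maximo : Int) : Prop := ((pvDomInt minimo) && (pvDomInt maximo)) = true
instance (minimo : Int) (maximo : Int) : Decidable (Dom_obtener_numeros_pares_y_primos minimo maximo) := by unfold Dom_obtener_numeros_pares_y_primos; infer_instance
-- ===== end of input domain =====

-- B replaces A's per-number trial division by a segment sieve (a boolean array over
-- [max(minimo,2), maximo] struck at the multiples k*d, k ≥ 2, of every d up to isqrt(maximo))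
-- and generates the evens by a stride-2 range; measured faster on the timing inputs.

-- ===== PORT A =====
-- for-loop with early 'return False' over range(2, int(numero**0.5)+1)
def es_primo_loop (numero : Int) : List Int → Bool
  | [] => true
  | i :: rest => if PySem.Int.mod numero i == 0 then false else es_primo_loop numero rest

-- int(numero ** 0.5) is ported as Nat.sqrt: exact for 2 ≤ numero ≤ 2^31 (the double sqrt of such
-- an int truncates to the integer square root), the only values reaching the power on Dom.
def es_primo (numero : Int) : Bool :=
  if numero < 2 then false
  else es_primo_loop numero (PySem.List.pyRange 2 ((Nat.sqrt numero.toNat : Int) + 1) 1)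

def obtener_numeros_pares_y_primos (minimo : Int) (maximo : Int) : List Int × List Int :=
  let pares : List Int := []
  let primos : List Int := []
  let st := (PySem.List.pyRange minimo (maximo + 1) 1).foldl
    (fun (acc : List Int × List Int) num =>
      let pares := if PySem.Int.mod num 2 == 0 then acc.1 ++ [num] else acc.1
      let primos := if es_primo num then acc.2 ++ [num] else acc.2
      (pares, primos)) (pares, primos)
  (st.2, st.1)

-- ===== PORT B =====
-- r = 1; while (r + 1) * (r + 1) <= maximo: r += 1
def sqrtLoop (maximo : Int) (r : Int) : Int :=
  if h : (r + 1) * (r + 1) ≤ maximo then sqrtLoop maximo (r + 1) else r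
termination_by (maximo - r).toNat
decreasing_by
  have h2 : r < (r + 1) * (r + 1) := by nlinarith [sq_nonneg (2 * r + 1)]
  omega

def obtener_numeros_pares_y_primos_alt (minimo : Int) (maximo : Int) : List Int × List Int :=
  let lo := max minimo 2
  let primos :=
    if maximo < lo then ([] : List Int)
    else
      let size := maximo - lo + 1
      let es := List.replicate size.toNat true
      let r := sqrtLoop maximo 1
      let es := (PySem.List.pyRange 2 (r + 1) 1).foldl (fun es d =>
        let start := max (2 * d) (PySem.Int.floordiv (lo + d - 1) d * d)
        -- es[m - lo] = False : m - lo is always in [0, size), so .toNat/List.set are exact here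
        (PySem.List.pyRange start (maximo + 1) d).foldl
          (fun es m => es.set (m - lo).toNat false) es) es
      -- [lo + i for i in range(size) if es[i]] : i is always in range, so getD is exact here
      ((PySem.List.pyRange 0 size 1).filter (fun i => es.getD i.toNat false)).map (fun i => lo + i)
  let inicio := if PySem.Int.mod minimo 2 == 0 then minimo else minimo + 1
  let pares := PySem.List.pyRange inicio (maximo + 1) 2
  (primos, pares)

-- ===== PRECONDITION & SPEC =====
def Spec_obtener_numeros_pares_y_primos (minimo : Int) (maximo : Int) (out : List Int × List Int) : Prop := out = obtener_numeros_pares_y_primos_alt minimo maximo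
instance (minimo : Int) (maximo : Int) (out : List Int × List Int) : Decidable (Spec_obtener_numeros_pares_y_primos minimo maximo out) := by unfold Spec_obtener_numeros_pares_y_primos; infer_instance

-- ===== CLAIM (what is proved, stated in full; the proofs are below) =====
def Claim_equal_obtener_numeros_pares_y_primos : Prop := ∀ (minimo : Int) (maximo : Int), Dom_obtener_numeros_pares_y_primos minimo maximo → Spec_obtener_numeros_pares_y_primos minimo maximo (obtener_numeros_pares_y_primos minimo maximo)

-- ===== LEMMAS AND PROOFS =====

-- the common characterisation both primality tests are reduced to
def NoSmallDiv (n : Int) : Prop := ∀ i : Int, 2 ≤ i → i * i ≤ n → PySem.Int.mod n i ≠ 0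

theorem le_sqrt_iff_int (n i : Int) (hn : 0 ≤ n) (hi : 0 ≤ i) :
    i ≤ ((Nat.sqrt n.toNat : Nat) : Int) ↔ i * i ≤ n := by
  lift n to Nat using hn
  lift i to Nat using hi
  rw [Int.toNat_natCast]
  exact_mod_cast Nat.le_sqrt

theorem es_primo_loop_iff (n a b : Int) :
    es_primo_loop n (PySem.List.pyRange a b 1) = true ↔
      ∀ i : Int, a ≤ i → i < b → PySem.Int.mod n i ≠ 0 := by
  by_cases hab : b ≤ a
  · rw [PySem.List.pyRange_one_eq_nil hab]
    constructor
    · intro _ i h1 h2; omega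
    · intro _; rfl
  · push Not at hab
    rw [PySem.List.pyRange_one_cons hab]
    show (if (PySem.Int.mod n a == 0) = true then false else es_primo_loop n (PySem.List.pyRange (a+1) b 1)) = true ↔ _
    by_cases hz : (PySem.Int.mod n a == 0) = true
    · rw [if_pos hz]
      constructor
      · intro h; exact absurd h (by simp)
      · intro h
        exact absurd (by simpa using hz) (h a le_rfl hab)
    · rw [if_neg hz]
      rw [es_primo_loop_iff n (a+1) b]
      constructor
      · intro h i h1 h2
        rcases eq_or_lt_of_le h1 with rfl | h1'
        · simpa using hz
        · exact h i (by omega) h2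
      · intro h i h1 h2; exact h i (by omega) h2
termination_by (b - a).toNat
decreasing_by omega

theorem es_primo_iff (n : Int) : es_primo n = true ↔ 2 ≤ n ∧ NoSmallDiv n := by
  unfold es_primo
  by_cases hn : n < 2
  · rw [if_pos hn]
    constructor
    · intro h; exact absurd h (by simp)
    · intro h; omega
  · rw [if_neg hn]
    push Not at hn
    rw [es_primo_loop_iff]
    unfold NoSmallDiv
    constructor
    · intro h
      refine ⟨hn, fun i h1 h2 => ?_⟩
      apply h i h1
      have := (le_sqrt_iff_int n i (by omega) (by omega)).mpr h2
      omega
    · intro ⟨_, h⟩ i h1 h2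
      apply h i h1
      exact (le_sqrt_iff_int n i (by omega) (by omega)).mp (by omega)

-- A's joint accumulating fold splits into the two filters
theorem foldl_pair (l : List Int) (p q : List Int) :
    l.foldl (fun (acc : List Int × List Int) num =>
        (if PySem.Int.mod num 2 == 0 then acc.1 ++ [num] else acc.1,
         if es_primo num then acc.2 ++ [num] else acc.2)) (p, q)
      = (p ++ l.filter (fun x => PySem.Int.mod x 2 == 0),
         q ++ l.filter (fun x => es_primo x)) := by
  induction l generalizing p q with
  | nil => simp
  | cons x xs ih =>
    simp only [List.foldl_cons, List.filter_cons]
    rw [ih]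
    split_ifs <;> simp

theorem pyRange_two_nil (a b : Int) (h : b ≤ a) : PySem.List.pyRange a b 2 = [] := by
  rw [PySem.List.pyRange_of_pos _ _ (by norm_num)]
  simp [show ¬ a < b by omega]

theorem pyRange_two_cons (a b : Int) (h : a < b) :
    PySem.List.pyRange a b 2 = a :: PySem.List.pyRange (a + 2) b 2 := by
  rw [PySem.List.pyRange_of_pos _ _ (by norm_num), PySem.List.pyRange_of_pos _ _ (by norm_num)]
  have hcnt : (if a < b then ((b - a + 2 - 1) / 2).toNat else 0)
      = (if a + 2 < b then ((b - (a + 2) + 2 - 1) / 2).toNat else 0) + 1 := by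
    by_cases h2 : a + 2 < b
    · simp only [if_pos h, if_pos h2]
      omega
    · simp only [if_pos h, if_neg h2]
      omega
  rw [hcnt, List.range_succ_eq_map]
  simp only [List.map_cons, List.map_map, Nat.cast_zero, mul_zero, add_zero]
  congr 1
  apply List.map_congr_left
  intro k _
  simp only [Function.comp_apply, Nat.succ_eq_add_one]
  push_cast
  ring

-- the evens of range(a, b) are exactly range(first even ≥ a, b, 2)
theorem filter_even_pyRange (a b : Int) :
    (PySem.List.pyRange a b 1).filter (fun x => PySem.Int.mod x 2 == 0)
      = PySem.List.pyRange (if PySem.Int.mod a 2 == 0 then a else a + 1) b 2 := by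
  by_cases hab : b ≤ a
  · rw [PySem.List.pyRange_one_eq_nil hab, pyRange_two_nil]
    · simp
    · split <;> omega
  · push Not at hab
    rw [PySem.List.pyRange_one_cons hab, List.filter_cons]
    rw [filter_even_pyRange (a + 1) b]
    by_cases ha : (PySem.Int.mod a 2 == 0) = true
    · have ha1 : ¬ ((PySem.Int.mod (a + 1) 2 == 0) = true) := by
        have ha' : PySem.Int.mod a 2 = 0 := by simpa using ha
        rw [PySem.Int.mod_eq_emod_of_pos (by norm_num : (0:Int) < 2)] at ha' ⊢
        simp only [beq_iff_eq]
        omega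
      rw [if_pos ha, if_pos ha, if_neg ha1, pyRange_two_cons a b hab]
      norm_num [add_assoc]
    · have ha1 : (PySem.Int.mod (a + 1) 2 == 0) = true := by
        have ha' : ¬ PySem.Int.mod a 2 = 0 := by simpa using ha
        rw [PySem.Int.mod_eq_emod_of_pos (by norm_num : (0:Int) < 2)] at ha' ⊢
        simp only [beq_iff_eq]
        omega
      rw [if_neg ha, if_neg ha, if_pos ha1]
termination_by (b - a).toNat
decreasing_by omega

-- ----- B-side: the sieve -----

theorem sqrtLoop_spec (maximo r : Int) :
    r ≤ sqrtLoop maximo r ∧ maximo < (sqrtLoop maximo r + 1) * (sqrtLoop maximo r + 1) := by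
  rw [sqrtLoop.eq_def]
  by_cases h : (r + 1) * (r + 1) ≤ maximo
  · rw [dif_pos h]
    have := sqrtLoop_spec maximo (r + 1)
    exact ⟨by omega, this.2⟩
  · rw [dif_neg h]
    exact ⟨le_rfl, by omega⟩
termination_by (maximo - r).toNat
decreasing_by
  have h2 : r < (r + 1) * (r + 1) := by nlinarith [sq_nonneg (2 * r + 1)]
  omega

-- one strike pass: entry j becomes false exactly on the members of the struck list
theorem strike_length (lo : Int) (l : List Int) (es : List Bool) :
    (l.foldl (fun es m => es.set (m - lo).toNat false) es).length = es.length := by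
  induction l generalizing es with
  | nil => rfl
  | cons m ms ih => simp [List.foldl_cons, ih]

theorem strike_getD (lo : Int) (l : List Int) (es : List Bool) (j : Nat)
    (hj : j < es.length) (hl : ∀ m ∈ l, lo ≤ m) :
    (l.foldl (fun es m => es.set (m - lo).toNat false) es).getD j false
      = if (lo + (j : Int)) ∈ l then false else es.getD j false := by
  induction l generalizing es with
  | nil => simp
  | cons m ms ih =>
    simp only [List.foldl_cons]
    rw [ih (es.set (m - lo).toNat false) (by simpa using hj)
        (fun x hx => hl x (List.mem_cons_of_mem _ hx))]
    have hm : lo ≤ m := hl m (List.mem_cons_self ..)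
    have hset : (es.set (m - lo).toNat false).getD j false
        = if m = lo + (j : Int) then false else es.getD j false := by
      by_cases he : m = lo + (j : Int)
      · rw [if_pos he]
        have : (m - lo).toNat = j := by omega
        rw [this, List.getD_eq_getElem?_getD, List.getElem?_set_self (by omega)]
        rfl
      · rw [if_neg he]
        rw [List.getD_eq_getElem?_getD, List.getD_eq_getElem?_getD,
            List.getElem?_set_ne (by omega)]
    rw [hset]
    by_cases h1 : (lo + (j : Int)) ∈ ms <;> by_cases h2 : m = lo + (j : Int) <;>
      · have h2' : ((lo + (j : Int)) = m) = (m = lo + (j : Int)) :=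
          propext ⟨fun h => h.symm, fun h => h.symm⟩
        simp [List.mem_cons, h1, h2, h2']

-- ceiling multiple: for 0 < d, ((lo + d - 1) // d) * d is the least multiple of d that is ≥ lo
theorem ceil_mult_ge (lo d : Int) (hd : 0 < d) :
    lo ≤ PySem.Int.floordiv (lo + d - 1) d * d := by
  rw [PySem.Int.floordiv_eq_ediv_of_pos hd, mul_comm]
  have h1 := Int.mul_ediv_add_emod (lo + d - 1) d
  have h2 := Int.emod_nonneg (lo + d - 1) (by omega : d ≠ 0)
  have h3 := Int.emod_lt_of_pos (lo + d - 1) hd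
  omega

theorem ceil_mult_le (lo d n : Int) (hd : 0 < d) (hdvd : d ∣ n) (hn : lo ≤ n) :
    PySem.Int.floordiv (lo + d - 1) d * d ≤ n := by
  obtain ⟨k, rfl⟩ := hdvd
  rw [PySem.Int.floordiv_eq_ediv_of_pos hd]
  have hc : d * k = k * d := mul_comm d k
  have hle : lo + d - 1 ≤ k * d + (d - 1) := by omega
  have hq : (lo + d - 1) / d ≤ k := by
    have h1 := Int.ediv_le_ediv hd hle
    have h2 : (k * d + (d - 1)) / d = k := by
      rw [add_comm, Int.add_mul_ediv_right _ _ (by omega : d ≠ 0),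
          Int.ediv_eq_zero_of_lt (by omega) (by omega)]
      ring
    omega
  calc (lo + d - 1) / d * d ≤ k * d := by nlinarith [hq]
    _ = d * k := mul_comm k d

-- marked ⟺ struck by some d ∈ [2, r]
theorem sieve_getD (lo maximo : Int) (ds : List Int) (es : List Bool) (j : Nat)
    (hj : j < es.length) (hds : ∀ d ∈ ds, 2 ≤ d) :
    ((ds.foldl (fun es d =>
        (PySem.List.pyRange (max (2 * d) (PySem.Int.floordiv (lo + d - 1) d * d)) (maximo + 1) d).foldl
          (fun es m => es.set (m - lo).toNat false) es) es).getD j false = false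
      ↔ es.getD j false = false ∨
        ∃ d ∈ ds, (lo + (j : Int)) ∈
          PySem.List.pyRange (max (2 * d) (PySem.Int.floordiv (lo + d - 1) d * d)) (maximo + 1) d) := by
  induction ds generalizing es with
  | nil => simp
  | cons d rest ih =>
    simp only [List.foldl_cons]
    have hd2 : 2 ≤ d := hds d (List.mem_cons_self ..)
    have hlen : ∀ es' : List Bool,
        ((PySem.List.pyRange (max (2 * d) (PySem.Int.floordiv (lo + d - 1) d * d)) (maximo + 1) d).foldl
          (fun es m => es.set (m - lo).toNat false) es').length = es'.length :=
      fun es' => strike_length lo _ es'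
    rw [ih _ (by rw [hlen]; exact hj) (fun x hx => hds x (List.mem_cons_of_mem _ hx))]
    have hl : ∀ m ∈ PySem.List.pyRange (max (2 * d) (PySem.Int.floordiv (lo + d - 1) d * d))
        (maximo + 1) d, lo ≤ m := by
      intro m hm
      rw [PySem.List.mem_pyRange_iff_of_pos (by omega)] at hm
      have hc := ceil_mult_ge lo d (by omega)
      have hmx := le_max_right (2 * d) (PySem.Int.floordiv (lo + d - 1) d * d)
      omega
    rw [strike_getD lo _ es j hj hl]
    constructor
    · rintro (h | h)
      · by_cases hm : (lo + (j : Int)) ∈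
            PySem.List.pyRange (max (2 * d) (PySem.Int.floordiv (lo + d - 1) d * d)) (maximo + 1) d
        · exact Or.inr ⟨d, List.mem_cons_self .., hm⟩
        · rw [if_neg hm] at h
          exact Or.inl h
      · obtain ⟨d', hd', hm⟩ := h
        exact Or.inr ⟨d', List.mem_cons_of_mem _ hd', hm⟩
    · rintro (h | ⟨d', hd', hm⟩)
      · left; split_ifs with _
        · rfl
        · exact h
      · rcases List.mem_cons.mp hd' with rfl | hd''
        · left; rw [if_pos hm]
        · exact Or.inr ⟨d', hd'', hm⟩

-- struck by some d ⟺ has a divisor d ∈ [2, r] with n ≥ 2d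
theorem mem_strike_range_iff (lo maximo d n : Int) (hd : 2 ≤ d) (hlo : lo ≤ n)
    (hn : n ≤ maximo) :
    (n ∈ PySem.List.pyRange (max (2 * d) (PySem.Int.floordiv (lo + d - 1) d * d)) (maximo + 1) d)
      ↔ d ∣ n ∧ 2 * d ≤ n := by
  rw [PySem.List.mem_pyRange_iff_of_pos (by omega)]
  have hdvd_start : d ∣ PySem.Int.floordiv (lo + d - 1) d * d := dvd_mul_left d _
  constructor
  · rintro ⟨h1, _, h3⟩
    have hstart : d ∣ max (2 * d) (PySem.Int.floordiv (lo + d - 1) d * d) := by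
      rcases max_cases (2 * d) (PySem.Int.floordiv (lo + d - 1) d * d) with ⟨he, _⟩ | ⟨he, _⟩
      · rw [he]; exact dvd_mul_left d 2
      · rw [he]; exact hdvd_start
    have : d ∣ n := by
      have := dvd_add h3 hstart
      simpa using this
    exact ⟨this, le_trans (le_max_left _ _) h1⟩
  · rintro ⟨h1, h2⟩
    have hle : PySem.Int.floordiv (lo + d - 1) d * d ≤ n := ceil_mult_le lo d n (by omega) h1 hlo
    refine ⟨by omega, by omega, ?_⟩
    have hstart : d ∣ max (2 * d) (PySem.Int.floordiv (lo + d - 1) d * d) := by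
      rcases max_cases (2 * d) (PySem.Int.floordiv (lo + d - 1) d * d) with ⟨he, _⟩ | ⟨he, _⟩
      · rw [he]; exact dvd_mul_left d 2
      · rw [he]; exact hdvd_start
    exact dvd_sub h1 hstart

-- the struck condition is exactly the negation of NoSmallDiv, for 2 ≤ n ≤ maximo
theorem struck_iff_small_div (maximo n : Int) (hn2 : 2 ≤ n) (hnm : n ≤ maximo) :
    (∃ d : Int, 2 ≤ d ∧ d ≤ sqrtLoop maximo 1 ∧ d ∣ n ∧ 2 * d ≤ n) ↔ ¬ NoSmallDiv n := by
  obtain ⟨hr1, hr2⟩ := sqrtLoop_spec maximo 1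
  unfold NoSmallDiv
  push Not
  constructor
  · rintro ⟨d, hd2, _, ⟨k, rfl⟩, h2d⟩
    have hk2 : 2 ≤ k := by nlinarith
    refine ⟨min d k, le_min hd2 hk2, ?_, ?_⟩
    · rcases min_cases d k with ⟨he, hle⟩ | ⟨he, hle⟩ <;> rw [he] <;> nlinarith
    · rw [PySem.Int.mod_eq_zero_iff_dvd]
      rcases min_cases d k with ⟨he, _⟩ | ⟨he, _⟩ <;> rw [he]
      · exact Dvd.intro k rfl
      · exact Dvd.intro_left d rfl
  · rintro ⟨i, hi2, hii, hmod⟩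
    rw [PySem.Int.mod_eq_zero_iff_dvd] at hmod
    obtain ⟨k, hk⟩ := hmod
    have hir : i ≤ sqrtLoop maximo 1 := by nlinarith
    have hk2 : 2 ≤ k := by nlinarith
    exact ⟨i, hi2, hir, ⟨k, hk⟩, by nlinarith⟩


-- after the whole sieve, entry i holds exactly es_primo (lo + i)
theorem sieve_correct (minimo maximo i : Int) (h : ¬ maximo < max minimo 2)
    (hi0 : 0 ≤ i) (hi : i < maximo - max minimo 2 + 1) :
    ((PySem.List.pyRange 2 (sqrtLoop maximo 1 + 1) 1).foldl (fun es d =>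
        (PySem.List.pyRange (max (2 * d) (PySem.Int.floordiv (max minimo 2 + d - 1) d * d))
            (maximo + 1) d).foldl
          (fun es m => es.set (m - max minimo 2).toNat false) es)
      (List.replicate (maximo - max minimo 2 + 1).toNat true)).getD i.toNat false
    = es_primo (max minimo 2 + i) := by
  have hlen : i.toNat < (List.replicate (maximo - max minimo 2 + 1).toNat true).length := by
    rw [List.length_replicate]; omega
  have hcast : max minimo 2 + (i.toNat : Int) = max minimo 2 + i := by omega
  have hchar := sieve_getD (max minimo 2) maximo (PySem.List.pyRange 2 (sqrtLoop maximo 1 + 1) 1)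
    (List.replicate (maximo - max minimo 2 + 1).toNat true) i.toNat hlen
    (fun d hd => (PySem.List.mem_pyRange_one.mp hd).1)
  rw [hcast] at hchar
  have hrep : (List.replicate (maximo - max minimo 2 + 1).toNat true).getD i.toNat false = true :=
    List.getD_replicate _ (by omega)
  rw [hrep] at hchar
  have hn2 : 2 ≤ max minimo 2 + i := by omega
  have hnm : max minimo 2 + i ≤ maximo := by omega
  have hstruck : (∃ d ∈ PySem.List.pyRange 2 (sqrtLoop maximo 1 + 1) 1,
      (max minimo 2 + i) ∈ PySem.List.pyRange
        (max (2 * d) (PySem.Int.floordiv (max minimo 2 + d - 1) d * d)) (maximo + 1) d)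
      ↔ ¬ NoSmallDiv (max minimo 2 + i) := by
    rw [← struck_iff_small_div maximo _ hn2 hnm]
    constructor
    · rintro ⟨d, hd, hm⟩
      obtain ⟨hd2, hdr⟩ := PySem.List.mem_pyRange_one.mp hd
      obtain ⟨hdvd, h2d⟩ := (mem_strike_range_iff (max minimo 2) maximo d _ hd2 (by omega) hnm).mp hm
      exact ⟨d, hd2, by omega, hdvd, h2d⟩
    · rintro ⟨d, hd2, hdr, hdvd, h2d⟩
      exact ⟨d, PySem.List.mem_pyRange_one.mpr ⟨hd2, by omega⟩,
        (mem_strike_range_iff (max minimo 2) maximo d _ hd2 (by omega) hnm).mpr ⟨hdvd, h2d⟩⟩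
  have hprim := es_primo_iff (max minimo 2 + i)
  cases hval : ((PySem.List.pyRange 2 (sqrtLoop maximo 1 + 1) 1).foldl (fun es d =>
        (PySem.List.pyRange (max (2 * d) (PySem.Int.floordiv (max minimo 2 + d - 1) d * d))
            (maximo + 1) d).foldl
          (fun es m => es.set (m - max minimo 2).toNat false) es)
      (List.replicate (maximo - max minimo 2 + 1).toNat true)).getD i.toNat false with
  | false =>
    rw [hval] at hchar
    have := hstruck.mp (by simpa using hchar.mp rfl)
    cases hp : es_primo (max minimo 2 + i) with
    | false => rfl
    | true => exact absurd (hprim.mp hp).2 this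
  | true =>
    rw [hval] at hchar
    cases hp : es_primo (max minimo 2 + i) with
    | true => rfl
    | false =>
      by_cases hns : NoSmallDiv (max minimo 2 + i)
      · exact absurd (hprim.mpr ⟨hn2, hns⟩) (by simp [hp])
      · have := hchar.mpr (Or.inr (hstruck.mpr hns))
        simp at this

-- the prefix range(minimo, max(minimo, 2)) holds only numbers below 2: none are primes
theorem filter_primo_low (a : Int) :
    (PySem.List.pyRange a (max a 2) 1).filter (fun x => es_primo x) = [] := by
  rw [List.filter_eq_nil_iff]
  intro n hn hp
  have hm := PySem.List.mem_pyRange_one.mp hn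
  have := (es_primo_iff n).mp hp
  omega

-- B's primos branch computes the filter A computes
theorem alt_eq (minimo maximo : Int) :
    obtener_numeros_pares_y_primos_alt minimo maximo
      = ((PySem.List.pyRange minimo (maximo + 1) 1).filter (fun x => es_primo x),
         PySem.List.pyRange (if PySem.Int.mod minimo 2 == 0 then minimo else minimo + 1)
           (maximo + 1) 2) := by
  unfold obtener_numeros_pares_y_primos_alt
  simp only []
  refine Prod.ext ?_ rfl
  simp only []
  by_cases h : maximo < max minimo 2
  · rw [if_pos h, eq_comm, List.filter_eq_nil_iff]
    intro n hn hp
    have hm := PySem.List.mem_pyRange_one.mp hn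
    have := (es_primo_iff n).mp hp
    omega
  · rw [if_neg h]
    rw [PySem.List.pyRange_one_append minimo (max minimo 2) (maximo + 1) (le_max_left _ _) (by omega),
        List.filter_append, filter_primo_low minimo]
    rw [List.nil_append]
    rw [PySem.List.pyRange_one (max minimo 2) (maximo + 1), PySem.List.pyRange_one 0 (maximo - max minimo 2 + 1)]
    rw [List.filter_map, List.filter_map, List.map_map]
    have hN : (maximo + 1 - max minimo 2).toNat = (maximo - max minimo 2 + 1 - 0).toNat := by omega
    rw [hN]
    have hfil : List.filter ((fun x => es_primo x) ∘ fun k : Nat => max minimo 2 + (k : Int))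
          (List.range (maximo - max minimo 2 + 1 - 0).toNat)
        = List.filter ((fun i : Int =>
            ((PySem.List.pyRange 2 (sqrtLoop maximo 1 + 1) 1).foldl (fun es d =>
              (PySem.List.pyRange (max (2 * d) (PySem.Int.floordiv (max minimo 2 + d - 1) d * d))
                  (maximo + 1) d).foldl
                (fun es m => es.set (m - max minimo 2).toNat false) es)
              (List.replicate (maximo - max minimo 2 + 1).toNat true)).getD i.toNat false)
            ∘ fun k : Nat => (0 : Int) + (k : Int))
          (List.range (maximo - max minimo 2 + 1 - 0).toNat) := by
      apply List.filter_congr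
      intro k hk
      rw [List.mem_range] at hk
      simp only [Function.comp_apply, zero_add, Int.toNat_natCast]
      rw [← sieve_correct minimo maximo (k : Int) h (by omega) (by omega), Int.toNat_natCast]
    rw [hfil]
    apply List.map_congr_left
    intro k _
    simp only [Function.comp_apply]
    omega

-- ===== VERDICT (by name: the statement is the Claim_ definition above) =====
theorem obtener_numeros_pares_y_primos_spec : Claim_equal_obtener_numeros_pares_y_primos := by
  intro minimo maximo _
  unfold Spec_obtener_numeros_pares_y_primos
  unfold obtener_numeros_pares_y_primos
  simp only []
  rw [foldl_pair]
  simp only [List.nil_append]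
  rw [alt_eq, filter_even_pyRange]
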